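-- pv_equiv track=rewrite | github.com/harikirtandas/Historia-Clinica-de-Alumnos-de-Yoga | app/controllers/alumnos.py | _break_long_words
-- ===== SOURCE A (Python) =====
-- def _break_long_words(text, max_len=60):
--     words = []
--     for word in text.split(" "):
--         if len(word) <= max_len:
--             words.append(word)
--             continue
--         chunks = [word[i : i + max_len] for i in range(0, len(word), max_len)]
--         words.append(" ".join(chunks))
--     return " ".join(words)
-- ===== SOURCE B (Python) =====
-- def _break_long_words(text, max_len=60):
--     out = []
--     run = 0
--     for ch in text:
--         if ch == " ":
--             out.append(ch)
--             run = 0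
--         else:
--             if run == max_len:
--                 out.append(" ")
--                 run = 0
--             out.append(ch)
--             run += 1
--     return "".join(out)
-- ===== Notes on version B (the rewrite author's own statement) =====
-- stated objective: alternative
-- what changed: Replaced split-into-words plus per-word slice-chunking and double join by a single linear pass over the characters that counts the current run of non-space characters and lazily inserts a break space before the character that would make a run exceed max_len.
-- outside the precondition, e.g. on _break_long_words('abc', -1): A returns '', B returns 'abc'; on _break_long_words('abc', 0): A raises ValueError, B returns ' abc'
import Mathlib
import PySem

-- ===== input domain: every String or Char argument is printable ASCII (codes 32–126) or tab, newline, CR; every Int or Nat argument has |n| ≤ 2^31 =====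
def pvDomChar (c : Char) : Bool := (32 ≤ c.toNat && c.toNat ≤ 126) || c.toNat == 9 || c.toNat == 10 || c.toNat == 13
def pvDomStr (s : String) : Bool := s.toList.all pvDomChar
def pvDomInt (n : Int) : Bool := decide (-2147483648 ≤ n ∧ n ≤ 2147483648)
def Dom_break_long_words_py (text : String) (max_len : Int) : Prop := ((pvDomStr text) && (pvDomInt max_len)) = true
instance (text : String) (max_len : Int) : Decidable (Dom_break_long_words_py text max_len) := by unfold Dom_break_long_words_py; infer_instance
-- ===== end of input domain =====

-- B replaces split + per-word slice-chunking + double join by one linear pass with a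
-- run counter that lazily inserts a break space (objective: alternative algorithm).

-- ===== PORT A =====
def break_long_words_py (text : String) (max_len : Int) : String :=
  let words : List (List Char) :=
    (PySem.Chars.splitOn text.toList [' ']).foldl
      (fun words word =>
        if (PySem.Chars.len word : Int) ≤ max_len then
          words ++ [word]
        else
          let chunks :=
            (PySem.List.pyRange 0 (PySem.Chars.len word : Int) max_len).map
              (fun i => PySem.Chars.slice word (some i) (some (i + max_len)))
          words ++ [PySem.Chars.join [' '] chunks])
      []
  String.ofList (PySem.Chars.join [' '] words)

-- ===== PORT B =====
def break_long_words_py_alt (text : String) (max_len : Int) : String :=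
  let st : List Char × Int :=
    text.toList.foldl
      (fun (st : List Char × Int) ch =>
        if ch = ' ' then (st.1 ++ [ch], 0)
        else if st.2 = max_len then (st.1 ++ [' ', ch], 1)
        else (st.1 ++ [ch], st.2 + 1))
      ([], 0)
  String.ofList st.1

-- ===== PRECONDITION & SPEC =====
-- Pre_ excludes max_len ≤ 0: with max_len = 0 A raises ValueError (range step 0) on any
-- text containing a non-space character, and with negative max_len A silently replaces
-- every word by the empty string (range yields no chunks), an artefact of A's slicing loop.
def Pre_break_long_words_py (text : String) (max_len : Int) : Prop := 1 ≤ max_len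
instance (text : String) (max_len : Int) : Decidable (Pre_break_long_words_py text max_len) := by unfold Pre_break_long_words_py; infer_instance
def pvWitness_break_long_words_py : String × Int := ("hello world", 3)
def Spec_break_long_words_py (text : String) (max_len : Int) (out : String) : Prop := out = break_long_words_py_alt text max_len
instance (text : String) (max_len : Int) (out : String) : Decidable (Spec_break_long_words_py text max_len out) := by unfold Spec_break_long_words_py; infer_instance

-- ===== CLAIM (what is proved, stated in full; the proofs are below) =====
def Claim_equal_break_long_words_py : Prop := ∀ (text : String) (max_len : Int), Dom_break_long_words_py text max_len → Pre_break_long_words_py text max_len → Spec_break_long_words_py text max_len (break_long_words_py text max_len)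

-- ===== LEMMAS AND PROOFS =====

-- B's output after the fold, as a structural recursion over the remaining characters.
def pvBrk (m : Int) : Int → List Char → List Char
  | _, [] => []
  | run, c :: rest =>
    if c = ' ' then ' ' :: pvBrk m 0 rest
    else if run = m then ' ' :: c :: pvBrk m 1 rest
    else c :: pvBrk m (run + 1) rest

-- Python's s.split(" ") as a structural recursion (cur = current word, reversed).
def pvSplitSp (cur : List Char) : List Char → List (List Char)
  | [] => [cur.reverse]
  | c :: rest => if c = ' ' then cur.reverse :: pvSplitSp [] rest else pvSplitSp (c :: cur) rest

-- chunks of size mt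
def pvChunks (mt : Nat) (w : List Char) : List (List Char) :=
  if h : w = [] ∨ mt = 0 then [] else w.take mt :: pvChunks mt (w.drop mt)
termination_by w.length
decreasing_by
  push_neg at h
  simp only [List.length_drop]
  have := List.length_pos_iff.mpr h.1
  omega

-- the per-word transformation of port A
def pvProcA (m : Int) (word : List Char) : List Char :=
  if (PySem.Chars.len word : Int) ≤ m then word
  else PySem.Chars.join [' ']
    ((PySem.List.pyRange 0 (PySem.Chars.len word : Int) m).map
      (fun i => PySem.Chars.slice word (some i) (some (i + m))))

lemma pv_inter_single (s a : List Char) : List.intercalate s [a] = a := by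
  simp [List.intercalate]

lemma pv_inter_cons (s a : List Char) (l : List (List Char)) (h : l ≠ []) :
    List.intercalate s (a :: l) = a ++ s ++ List.intercalate s l := by
  obtain ⟨b, t, rfl⟩ := List.exists_cons_of_ne_nil h
  simp [List.intercalate, List.append_assoc]

lemma pv_splitSp_ne_nil (cs cur : List Char) : pvSplitSp cur cs ≠ [] := by
  induction cs generalizing cur with
  | nil => simp [pvSplitSp]
  | cons c rest ih =>
    by_cases hc : c = ' ' <;> simp [pvSplitSp, hc, ih]

lemma pv_splitSp_inter (cs : List Char) : ∀ cur,
    List.intercalate [' '] (pvSplitSp cur cs) = cur.reverse ++ cs := by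
  induction cs with
  | nil => intro cur; simp [pvSplitSp, List.intercalate]
  | cons c rest ih =>
    intro cur
    by_cases hc : c = ' '
    · subst hc
      rw [pvSplitSp, if_pos rfl, pv_inter_cons _ _ _ (pv_splitSp_ne_nil _ _), ih]
      simp
    · rw [pvSplitSp, if_neg hc, ih]
      simp
lemma pv_splitSp_nospace (cs : List Char) : ∀ cur, ' ' ∉ cur →
    ∀ w ∈ pvSplitSp cur cs, ' ' ∉ w := by
  induction cs with
  | nil => intro cur hcur w hw; simp [pvSplitSp] at hw; subst hw; simpa using hcur
  | cons c rest ih =>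
    intro cur hcur w hw
    by_cases hc : c = ' '
    · subst hc
      rw [pvSplitSp, if_pos rfl] at hw
      rcases List.mem_cons.mp hw with rfl | hw
      · simpa using hcur
      · exact ih [] (by simp) w hw
    · rw [pvSplitSp, if_neg hc] at hw
      exact ih (c :: cur) (by simp [hcur, Ne.symm hc]) w hw

-- the fueled splitter of PySem computes pvSplitSp
lemma pv_go_eq (fuel : Nat) : ∀ (l cur : List Char) (accs : List (List Char)),
    l.length < fuel →
    PySem.Chars.splitOn.go [' '] fuel l cur accs = accs.reverse ++ pvSplitSp cur l := by
  induction fuel with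
  | zero => intro l cur accs h; omega
  | succ n ih =>
    intro l cur accs h
    cases l with
    | nil => simp [PySem.Chars.splitOn.go, pvSplitSp]
    | cons c rest =>
      by_cases hc : c = ' '
      · subst hc
        rw [PySem.Chars.splitOn.go]
        rw [if_pos (by simp [List.isPrefixOf])]
        have hdrop : List.drop [' '].length (' ' :: rest) = rest := rfl
        rw [hdrop, ih rest [] (cur.reverse :: accs) (by simp at h ⊢; omega)]
        simp [pvSplitSp]
      · rw [PySem.Chars.splitOn.go]
        rw [if_neg (by simp [List.isPrefixOf, hc, Ne.symm hc])]
        rw [ih rest (c :: cur) accs (by simp at h ⊢; omega)]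
        simp [pvSplitSp, hc]

lemma pv_splitOn_eq (cs : List Char) :
    PySem.Chars.splitOn cs [' '] = pvSplitSp [] cs := by
  have := pv_go_eq (cs.length + 1) cs [] [] (by omega)
  simpa [PySem.Chars.splitOn] using this

-- B's foldl, characterised
lemma pv_fold_B (m : Int) (l : List Char) : ∀ (out : List Char) (run : Int),
    (l.foldl
      (fun (st : List Char × Int) ch =>
        if ch = ' ' then (st.1 ++ [ch], 0)
        else if st.2 = m then (st.1 ++ [' ', ch], 1)
        else (st.1 ++ [ch], st.2 + 1))
      (out, run)).1 = out ++ pvBrk m run l := by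
  induction l with
  | nil => intro out run; simp [pvBrk]
  | cons c rest ih =>
    intro out run
    by_cases hc : c = ' '
    · subst hc; simp only [List.foldl_cons, if_pos rfl, ih, pvBrk]; simp
    · by_cases hr : run = m
      · simp only [List.foldl_cons, if_neg hc, hr, if_pos rfl, ih, pvBrk]
        simp [hc]
      · simp only [List.foldl_cons, if_neg hc, if_neg hr, ih, pvBrk]
        simp [hc, hr]

-- A's foldl, characterised
lemma pv_fold_A (m : Int) (l : List (List Char)) : ∀ acc : List (List Char),
    (l.foldl
      (fun words word =>
        if (PySem.Chars.len word : Int) ≤ m then words ++ [word]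
        else
          words ++ [PySem.Chars.join [' ']
            ((PySem.List.pyRange 0 (PySem.Chars.len word : Int) m).map
              (fun i => PySem.Chars.slice word (some i) (some (i + m))))])
      acc) = acc ++ l.map (pvProcA m) := by
  induction l with
  | nil => intro acc; simp
  | cons w t ih =>
    intro acc
    by_cases hw : (PySem.Chars.len w : Int) ≤ m
    · rw [List.foldl_cons, if_pos hw, ih, List.map_cons]
      rw [pvProcA, if_pos hw]
      simp
    · rw [List.foldl_cons, if_neg hw, ih, List.map_cons]
      rw [pvProcA, if_neg hw]
      simp

lemma pv_chunks_nil (mt : Nat) : pvChunks mt [] = [] := by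
  rw [pvChunks]; simp

lemma pv_chunks_ne_nil (mt : Nat) (w : List Char) (hmt : 0 < mt) (hw : w ≠ []) :
    pvChunks mt w ≠ [] := by
  rw [pvChunks]; simp [hw, hmt.ne']

-- chunks, Nat form of the range comprehension
lemma pv_chunks_range (mt : Nat) (hmt : 0 < mt) : ∀ n (w : List Char), w.length = n →
    (List.range ((n + mt - 1) / mt)).map (fun k => (w.drop (mt * k)).take mt)
      = pvChunks mt w := by
  intro n
  induction n using Nat.strong_induction_on with
  | _ n ih =>
    intro w hw
    rcases Nat.eq_zero_or_pos n with rfl | hn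
    · have hwnil : w = [] := List.length_eq_zero_iff.mp hw
      subst hwnil
      rw [Nat.div_eq_of_lt (by omega)]
      simp [pv_chunks_nil]
    · have hwne : w ≠ [] := by
        intro hnil; rw [hnil] at hw; simp at hw; omega
      rw [pvChunks, dif_neg (by simp [hwne, hmt.ne'])]
      have hceil : (n + mt - 1) / mt = (n - 1) / mt + 1 := by
        have h1 : n + mt - 1 = (n - 1) + mt := by omega
        rw [h1, Nat.add_div_right _ hmt]
      rw [hceil, List.range_succ_eq_map, List.map_cons, List.map_map]
      have hdl : (w.drop mt).length = n - mt := by simp [hw]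
      have hrec := ih (n - mt) (by omega) (w.drop mt) hdl
      have hc2 : (n - mt + mt - 1) / mt = (n - 1) / mt := by
        rcases Nat.lt_or_ge n mt with hlt | hle
        · rw [Nat.div_eq_of_lt (by omega), Nat.div_eq_of_lt (by omega)]
        · congr 1; omega
      rw [hc2] at hrec
      rw [← hrec]
      have htail : List.map ((fun k => List.take mt (List.drop (mt * k) w)) ∘ Nat.succ)
          (List.range ((n - 1) / mt))
          = List.map (fun k => List.take mt (List.drop (mt * k) (List.drop mt w)))
            (List.range ((n - 1) / mt)) := by
        apply List.map_congr_left
        intro k hk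
        simp only [Function.comp_apply, List.drop_drop, Nat.succ_eq_add_one]
        have hmul : mt * (k + 1) = mt + mt * k := by ring
        rw [hmul]
      rw [htail]
      simp

-- A's chunk comprehension equals pvChunks
lemma pv_chunkA_eq (m : Int) (hm : 1 ≤ m) (w : List Char) :
    (PySem.List.pyRange 0 (w.length : Int) m).map
      (fun i => PySem.List.slice w (some i) (some (i + m))) = pvChunks m.toNat w := by
  obtain ⟨mt, rfl⟩ : ∃ mt : Nat, m = (mt : Int) :=
    ⟨m.toNat, (Int.toNat_of_nonneg (by omega)).symm⟩
  have hmt : 0 < mt := by exact_mod_cast hm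
  simp only [Int.toNat_natCast]
  rw [PySem.List.pyRange, if_neg (by exact_mod_cast hmt.ne')]
  rcases Nat.eq_zero_or_pos w.length with hlen | hlen
  · have hwnil : w = [] := List.length_eq_zero_iff.mp hlen
    subst hwnil
    simp [pv_chunks_nil]
  · rw [if_pos (by exact_mod_cast hmt)]
    rw [if_pos (by exact_mod_cast hlen)]
    have hcnt : (((w.length : Int) - 0 + mt - 1) / (mt : Int)).toNat
        = (w.length + mt - 1) / mt := by
      have h1 : ((w.length : Int) - 0 + mt - 1) = ((w.length + mt - 1 : Nat) : Int) := by
        push_cast; omega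
      rw [h1, ← Int.natCast_div]
      exact Int.toNat_natCast _
    rw [hcnt, List.map_map]
    rw [← pv_chunks_range mt hmt w.length w rfl]
    apply List.map_congr_left
    intro k _
    simp only [Function.comp_apply, zero_add]
    have h1 : (mt : Int) * (k : Int) = ((mt * k : Nat) : Int) := by push_cast; ring
    rw [h1, PySem.List.slice_natCast_add]

-- pvBrk with a partially used first chunk
lemma pv_brk_aux (m : Int) (hm : 1 ≤ m) (w : List Char) : ∀ i : Nat,
    ' ' ∉ w → i ≤ m.toNat →
    pvBrk m (i : Int) w =
      if w.length + i ≤ m.toNat then w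
      else w.take (m.toNat - i) ++ ' ' :: pvBrk m 0 (w.drop (m.toNat - i)) := by
  have hmt : (m.toNat : Int) = m := Int.toNat_of_nonneg (by omega)
  induction w with
  | nil =>
    intro i _ hi
    rw [if_pos (by simp only [List.length_nil]; omega)]
    rfl
  | cons c t ih =>
    intro i hw hi
    have hc : c ≠ ' ' := by intro h; exact hw (by simp [h])
    have ht : ' ' ∉ t := fun h => hw (by simp [h])
    by_cases hieq : i = m.toNat
    · subst hieq
      rw [pvBrk, if_neg hc, if_pos hmt]
      rw [if_neg (by simp only [List.length_cons]; omega)]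
      have hz : m.toNat - m.toNat = 0 := by omega
      rw [hz]
      simp only [List.take_zero, List.drop_zero, List.nil_append]
      have h0 : pvBrk m 0 (c :: t) = c :: pvBrk m 1 t := by
        rw [pvBrk, if_neg hc, if_neg (by omega)]
        norm_num
      rw [h0]
    · have hilt : i < m.toNat := lt_of_le_of_ne hi hieq
      have hine : (i : Int) ≠ m := by omega
      rw [pvBrk, if_neg hc, if_neg hine]
      have hcast : (i : Int) + 1 = ((i + 1 : Nat) : Int) := by push_cast; ring
      rw [hcast, ih (i + 1) ht (by omega)]
      by_cases hlen : t.length + (i + 1) ≤ m.toNat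
      · rw [if_pos hlen, if_pos (by simp only [List.length_cons]; omega)]
      · rw [if_neg hlen, if_neg (by simp only [List.length_cons]; omega)]
        have htk : m.toNat - i = (m.toNat - (i + 1)) + 1 := by omega
        rw [htk, List.take_succ_cons, List.drop_succ_cons]
        simp

lemma pv_brk_inter (m : Int) (hm : 1 ≤ m) : ∀ n (w : List Char), w.length = n → ' ' ∉ w →
    pvBrk m 0 w = List.intercalate [' '] (pvChunks m.toNat w) := by
  have hmt : 0 < m.toNat := by omega
  intro n
  induction n using Nat.strong_induction_on with
  | _ n ih =>
    intro w hwn hw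
    have h0 := pv_brk_aux m hm w 0 hw (by omega)
    simp only [Nat.cast_zero, Nat.add_zero, Nat.sub_zero, add_zero] at h0
    rw [h0]
    rcases eq_or_ne w [] with rfl | hwne
    · rw [if_pos (by simp only [List.length_nil]; omega)]
      simp [pv_chunks_nil, List.intercalate]
    · rw [pvChunks, dif_neg (by simp [hwne, hmt.ne'])]
      by_cases hlen : w.length ≤ m.toNat
      · rw [if_pos hlen]
        have hdrop : w.drop m.toNat = [] := List.drop_eq_nil_of_le hlen
        rw [hdrop, pv_chunks_nil, pv_inter_single]
        exact (List.take_of_length_le hlen).symm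
      · rw [if_neg hlen]
        have hdne : w.drop m.toNat ≠ [] := by
          intro h
          have := List.drop_eq_nil_iff.mp h
          omega
        rw [pv_inter_cons _ _ _ (pv_chunks_ne_nil _ _ hmt hdne)]
        have hdl : (w.drop m.toNat).length = n - m.toNat := by simp [hwn]
        have hds : ' ' ∉ w.drop m.toNat := fun h => hw (List.mem_of_mem_drop h)
        rw [← ih (n - m.toNat) (by omega) (w.drop m.toNat) hdl hds]
        simp [List.append_assoc]

-- per-word agreement
lemma pv_word (m : Int) (hm : 1 ≤ m) (w : List Char) (hw : ' ' ∉ w) :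
    pvBrk m 0 w = pvProcA m w := by
  rw [pvProcA]
  by_cases hlen : (PySem.Chars.len w : Int) ≤ m
  · rw [if_pos hlen]
    have h0 := pv_brk_aux m hm w 0 hw (by omega)
    simp only [Nat.cast_zero, add_zero] at h0
    rw [h0, if_pos (by simp [PySem.Chars.len] at hlen; omega)]
  · rw [if_neg hlen]
    have hlen' : PySem.Chars.len w = w.length := by simp [PySem.Chars.len]
    have hsl : ∀ (i j : Option Int), PySem.Chars.slice w i j = PySem.List.slice w i j :=
      fun i j => rfl
    simp only [hlen', hsl]
    rw [pv_chunkA_eq m hm w]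
    have hjoin : PySem.Chars.join [' '] (pvChunks m.toNat w)
        = List.intercalate [' '] (pvChunks m.toNat w) := rfl
    rw [hjoin, pv_brk_inter m hm w.length w rfl hw]

lemma pv_brk_append_space (m : Int) (w : List Char) : ∀ (run : Int) (rest : List Char),
    ' ' ∉ w → pvBrk m run (w ++ ' ' :: rest) = pvBrk m run w ++ ' ' :: pvBrk m 0 rest := by
  induction w with
  | nil => intro run rest _; simp [pvBrk]
  | cons c t ih =>
    intro run rest hw
    have hc : c ≠ ' ' := by intro h; exact hw (by simp [h])
    have ht : ' ' ∉ t := fun h => hw (by simp [h])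
    by_cases hr : run = m
    · simp [pvBrk, hc, hr, ih _ _ ht]
    · simp [pvBrk, hc, hr, ih _ _ ht]

lemma pv_main_words (m : Int) (hm : 1 ≤ m) : ∀ ws : List (List Char), ws ≠ [] →
    (∀ w ∈ ws, ' ' ∉ w) →
    pvBrk m 0 (List.intercalate [' '] ws) = List.intercalate [' '] (ws.map (pvProcA m)) := by
  intro ws
  induction ws with
  | nil => intro h; exact absurd rfl h
  | cons w t ih =>
    intro _ hws
    rcases eq_or_ne t [] with rfl | ht
    · simp only [List.map_cons, List.map_nil, pv_inter_single]
      exact pv_word m hm w (hws w (by simp))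
    · rw [pv_inter_cons _ _ _ ht, List.map_cons,
        pv_inter_cons _ _ _ (by simpa using ht)]
      have hw : ' ' ∉ w := hws w (by simp)
      rw [List.append_assoc]
      simp only [List.singleton_append]
      rw [pv_brk_append_space m w 0 _ hw, pv_word m hm w hw,
        ih ht (fun x hx => hws x (by simp [hx]))]
      simp [List.append_assoc]

-- ===== VERDICT (by name: the statement is the Claim_ definition above) =====
theorem break_long_words_py_spec : Claim_equal_break_long_words_py := by
  intro text m _ hpre
  unfold Spec_break_long_words_py
  simp only [break_long_words_py, break_long_words_py_alt]
  have hm : 1 ≤ m := hpre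
  set cs := text.toList with hcs
  rw [pv_fold_B m cs [] 0, pv_splitOn_eq cs, pv_fold_A m]
  simp only [List.nil_append, PySem.Chars.join]
  congr 1
  have h1 := pv_splitSp_inter cs []
  simp only [List.reverse_nil, List.nil_append] at h1
  have hmain := pv_main_words m hm (pvSplitSp [] cs) (pv_splitSp_ne_nil cs [])
    (pv_splitSp_nospace cs [] (by simp))
  rw [h1] at hmain
  exact hmain.symm
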